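-- pv_equiv track=rewrite | github.com/komikndr/raylight | src/raylight/diffusion_models/flux/xdit_context_parallel.py | invert_slices
-- ===== SOURCE A (Python) =====
-- def invert_slices(slices, length):
--     if slices is None:
--         return [(0, length)]
--
--     output = []
--     current = 0
--     for start, end in slices:
--         if start > current:
--             output.append((current, start))
--         current = end
--     if current < length:
--         output.append((current, length))
--     return output
-- ===== SOURCE B (Python) =====
-- def invert_slices(slices, length):
--     if slices is None:
--         return [(0, length)]
--     slices = list(slices)
--     lows = [0] + [end for _, end in slices]
--     highs = [start for start, _ in slices] + [length]
--     return [(lo, hi) for lo, hi in zip(lows, highs) if lo < hi]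
-- ===== Notes on version B (the rewrite author's own statement) =====
-- stated objective: alternative
-- what changed: Replaces the single stateful loop (running 'current' cursor with in-loop appends and a trailing tail check) by aligning two boundary lists -- [0]+ends zipped with starts+[length] -- and filtering the nonempty gaps.
import Mathlib
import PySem

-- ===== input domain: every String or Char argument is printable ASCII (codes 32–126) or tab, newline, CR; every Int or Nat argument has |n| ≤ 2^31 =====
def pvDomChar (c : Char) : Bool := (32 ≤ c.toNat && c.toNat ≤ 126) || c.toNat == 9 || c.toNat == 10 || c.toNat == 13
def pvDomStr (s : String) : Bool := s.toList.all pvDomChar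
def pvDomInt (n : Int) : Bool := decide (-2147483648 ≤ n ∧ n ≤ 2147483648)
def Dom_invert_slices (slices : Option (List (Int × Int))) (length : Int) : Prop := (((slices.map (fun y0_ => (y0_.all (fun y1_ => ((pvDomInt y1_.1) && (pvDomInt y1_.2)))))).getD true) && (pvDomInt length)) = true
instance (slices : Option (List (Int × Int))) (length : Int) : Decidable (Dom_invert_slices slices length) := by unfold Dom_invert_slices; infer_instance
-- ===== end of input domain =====

-- B replaces A's stateful cursor loop by zipping the boundary lists [0]+ends and starts+[length] and filtering nonempty gaps (alternative decomposition, same cost).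


-- ===== PORT A =====
def invert_slices (slices : Option (List (Int × Int))) (length : Int) : List (Int × Int) :=
  match slices with
  | none => [(0, length)]
  | some l =>
    let st := l.foldl (fun (st : List (Int × Int) × Int) (p : Int × Int) =>
      let output := st.1
      let current := st.2
      ((if p.1 > current then output ++ [(current, p.1)] else output), p.2)) ([], 0)
    if st.2 < length then st.1 ++ [(st.2, length)] else st.1

-- ===== PORT B =====
-- B: zip [0]+ends with starts+[length], keep nonempty gaps
def invert_slices_alt (slices : Option (List (Int × Int))) (length : Int) : List (Int × Int) :=
  match slices with
  | none => [(0, length)]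
  | some l =>
    let lows := 0 :: l.map (fun p => p.2)
    let highs := l.map (fun p => p.1) ++ [length]
    (lows.zip highs).filter (fun p => p.1 < p.2)

-- ===== PRECONDITION & SPEC =====
def Spec_invert_slices (slices : Option (List (Int × Int))) (length : Int) (out : List (Int × Int)) : Prop := out = invert_slices_alt slices length
instance (slices : Option (List (Int × Int))) (length : Int) (out : List (Int × Int)) : Decidable (Spec_invert_slices slices length out) := by unfold Spec_invert_slices; infer_instance

-- ===== CLAIM (what is proved, stated in full; the proofs are below) =====
def Claim_equal_invert_slices : Prop := ∀ (slices : Option (List (Int × Int))) (length : Int), Dom_invert_slices slices length → Spec_invert_slices slices length (invert_slices slices length)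

-- ===== LEMMAS AND PROOFS =====

-- ===== VERDICT (by name: the statement is the Claim_ definition above) =====
-- loop invariant: folding A's loop over l from state (acc, cur) and finishing with the
-- tail check equals acc ++ the zip-filter of B started at boundary cur
theorem invert_loop_eq (length : Int) (l : List (Int × Int)) :
    ∀ (acc : List (Int × Int)) (cur : Int),
    (let st := l.foldl (fun (st : List (Int × Int) × Int) (p : Int × Int) =>
        ((if p.1 > st.2 then st.1 ++ [(st.2, p.1)] else st.1), p.2)) (acc, cur)
     if st.2 < length then st.1 ++ [(st.2, length)] else st.1)
    = acc ++ ((cur :: l.map (fun p => p.2)).zip (l.map (fun p => p.1) ++ [length])).filter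
        (fun p => p.1 < p.2) := by
  induction l with
  | nil =>
    intro acc cur
    simp [List.filter]
    split_ifs with h
    · simp [decide_eq_true h]
    · simp [decide_eq_false h]
  | cons hd tl ih =>
    intro acc cur
    simp only [List.foldl_cons, List.map_cons, List.zip_cons_cons, List.filter_cons,
      List.cons_append]
    by_cases h : hd.1 > cur
    · have : decide (cur < hd.1) = true := decide_eq_true h
      simp only [if_pos h, this, ih]
      simp
    · have : decide (cur < hd.1) = false := decide_eq_false h
      simp only [if_neg h, this, ih]
      simp

theorem invert_slices_spec : Claim_equal_invert_slices := by
  intro slices length _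
  unfold Spec_invert_slices invert_slices invert_slices_alt
  cases slices with
  | none => rfl
  | some l =>
    simpa using invert_loop_eq length l [] 0
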